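-- pv_equiv track=rewrite | github.com/jaredxfeng/pycheckio | find_enemy.py | get_steps_to_enemy_bfs
-- ===== SOURCE A (Python) =====
-- def is_in_even_col(you):
--     return (ord(you[0]) - ord("A")) % 2
--
-- class Node:
--     def __init__(self, hex, running_steps):
--         self.hex = hex
--         self.running_steps = running_steps
--
-- def get_next_hex(hex, dir):
--     match dir:
--         case "N":
--             if hex[1] == "1":
--                 return None
--             return hex[0] + str(int(hex[1]) - 1)
--         case "S":
--             if hex[1] == "9":
--                 return None
--             return hex[0] + str(int(hex[1]) + 1)
--         case "NE":
--             if hex[0] == "Z" or (not is_in_even_col(hex) and hex[1] == "1"):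
--                 return None
--             return chr(ord(hex[0]) + 1) + (hex[1] if is_in_even_col(hex) else str(int(hex[1]) - 1))
--         case "SE":
--             if hex[0] == "Z" or (is_in_even_col(hex) and hex[1] == "9"):
--                 return None
--             return chr(ord(hex[0]) + 1) + (hex[1] if not is_in_even_col(hex) else str(int(hex[1]) + 1))
--         case "NW":
--             if hex[0] == "A" or (not is_in_even_col(hex) and hex[1] == "1"):
--                 return None
--             return chr(ord(hex[0]) - 1) + (hex[1] if is_in_even_col(hex) else str(int(hex[1]) - 1))
--         case "SW":
--             if hex[0] == "A" or (is_in_even_col(hex) and hex[1] == "9"):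
--                 return None
--             return chr(ord(hex[0]) - 1) + (hex[1] if not is_in_even_col(hex) else str(int(hex[1]) + 1))
--
-- def get_steps_to_enemy_bfs(you, enemy):
--     queue = [Node(you, [])]
--     visited = {you}
--     dirs = ["N", "NE", "SE", "S", "SW", "NW"]
--     while queue:
--         node = queue.pop(0)
--         if node.hex == enemy:
--             return node.running_steps
--         for dir in dirs:
--             next_hex = get_next_hex(node.hex, dir)
--             next_running_steps = node.running_steps.copy() + [dir]
--             if next_hex is not None and next_hex not in visited:
--                 queue.append(Node(next_hex, next_running_steps))
--                 visited.add(next_hex)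
--     return "IDK"
-- ===== SOURCE B (Python) =====
-- # B: same FIFO BFS over hex cells (same dirs order, same visited discipline), but
-- # parent-pointer bookkeeping instead of carrying a copied path in every node, and
-- # the neighbour step done by coordinate arithmetic instead of per-direction string
-- # surgery; the direction list is reconstructed from came_from at the end.
--
-- DIRS = ["N", "NE", "SE", "S", "SW", "NW"]
--
--
-- def _neighbor(cell, d):
--     c = ord(cell[0]) - 65          # 0-based column
--     r = int(cell[1])               # 1..9 row
--     dc = (d in ("NE", "SE")) - (d in ("NW", "SW"))
--     if d == "N":
--         dr = -1
--     elif d == "S":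
--         dr = 1
--     elif d in ("NE", "NW"):
--         dr = 0 if c % 2 else -1
--     else:                          # SE, SW
--         dr = 1 if c % 2 else 0
--     c2, r2 = c + dc, r + dr
--     if 0 <= c2 < 26 and 1 <= r2 <= 9:
--         return chr(65 + c2) + str(r2)
--     return None
--
--
-- def get_steps_to_enemy_bfs(you, enemy):
--     if you == enemy:
--         return []
--     queue = [you]
--     came_from = {}
--     visited = {you}
--     while queue:
--         cell = queue.pop(0)
--         if cell == enemy:
--             steps = []
--             while cell != you:
--                 cell, d = came_from[cell]
--                 steps.append(d)
--             steps.reverse()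
--             return steps
--         for d in DIRS:
--             nxt = _neighbor(cell, d)
--             if nxt is not None and nxt not in visited:
--                 came_from[nxt] = (cell, d)
--                 visited.add(nxt)
--                 queue.append(nxt)
--     return "IDK"
-- ===== Notes on version B (the rewrite author's own statement) =====
-- stated objective: alternative
-- what changed: Same FIFO BFS discovery order, but B records a came_from parent-pointer dict and reconstructs the direction list once at the end instead of copying a full path into every queue node, and computes neighbours by coordinate arithmetic with a bounds check instead of per-direction string surgery.
-- outside the precondition, e.g. on get_steps_to_enemy_bfs('A0', 'A-1'): A returns ['N'], B returns 'IDK'; on get_steps_to_enemy_bfs('A1', 'zz'): A returns 'IDK', B returns 'IDK'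
import Mathlib
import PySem

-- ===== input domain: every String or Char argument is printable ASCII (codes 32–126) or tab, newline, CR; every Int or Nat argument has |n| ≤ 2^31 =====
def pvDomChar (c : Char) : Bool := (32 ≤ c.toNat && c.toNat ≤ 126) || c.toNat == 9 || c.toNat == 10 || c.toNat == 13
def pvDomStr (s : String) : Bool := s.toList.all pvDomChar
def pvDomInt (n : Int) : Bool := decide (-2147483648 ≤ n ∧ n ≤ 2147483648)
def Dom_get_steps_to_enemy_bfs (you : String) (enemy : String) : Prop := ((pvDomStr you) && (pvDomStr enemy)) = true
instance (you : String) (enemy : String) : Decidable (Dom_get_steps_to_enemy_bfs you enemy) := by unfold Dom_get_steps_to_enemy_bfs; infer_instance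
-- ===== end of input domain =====

-- B replaces A's path-copying BFS nodes by a came_from parent dict (path rebuilt once
-- at the end) and does the neighbour step by coordinate arithmetic; same FIFO order.

-- ===== PORT A =====

-- (ord(you[0]) - ord("A")) % 2 ; Python raises IndexError on "" — unreachable under Pre_, 0 returned
def is_in_even_col (you : String) : Int :=
  match PySem.Str.pyGet? you 0 with
  | some c => PySem.Int.mod ((c.toNat : Int) - 65) 2
  | none => 0

-- get_next_hex: per-direction string surgery, exactly A's branches; the `none` fallbacks on
-- missing characters / non-digit second character are Python Index/ValueError — unreachable under Pre_
def get_next_hex (hex : String) (dir : String) : Option String :=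
  if dir = "N" then
    match PySem.Str.pyGet? hex 1 with
    | some c1 =>
      if c1 = '1' then none else
      match PySem.Str.pyGet? hex 0, PySem.Int.ofStr? (String.ofList [c1]) with
      | some c0, some n => some (String.ofList (c0 :: PySem.Int.toChars (n - 1)))
      | _, _ => none
    | none => none
  else if dir = "S" then
    match PySem.Str.pyGet? hex 1 with
    | some c1 =>
      if c1 = '9' then none else
      match PySem.Str.pyGet? hex 0, PySem.Int.ofStr? (String.ofList [c1]) with
      | some c0, some n => some (String.ofList (c0 :: PySem.Int.toChars (n + 1)))
      | _, _ => none
    | none => none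
  else if dir = "NE" then
    match PySem.Str.pyGet? hex 0, PySem.Str.pyGet? hex 1 with
    | some c0, some c1 =>
      if c0 = 'Z' ∨ (is_in_even_col hex = 0 ∧ c1 = '1') then none else
      match PySem.Int.ofStr? (String.ofList [c1]) with
      | some n => some (String.ofList (Char.ofNat (c0.toNat + 1) ::
          (if is_in_even_col hex ≠ 0 then [c1] else PySem.Int.toChars (n - 1))))
      | none => none
    | _, _ => none
  else if dir = "SE" then
    match PySem.Str.pyGet? hex 0, PySem.Str.pyGet? hex 1 with
    | some c0, some c1 =>
      if c0 = 'Z' ∨ (is_in_even_col hex ≠ 0 ∧ c1 = '9') then none else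
      match PySem.Int.ofStr? (String.ofList [c1]) with
      | some n => some (String.ofList (Char.ofNat (c0.toNat + 1) ::
          (if is_in_even_col hex = 0 then [c1] else PySem.Int.toChars (n + 1))))
      | none => none
    | _, _ => none
  else if dir = "NW" then
    match PySem.Str.pyGet? hex 0, PySem.Str.pyGet? hex 1 with
    | some c0, some c1 =>
      if c0 = 'A' ∨ (is_in_even_col hex = 0 ∧ c1 = '1') then none else
      match PySem.Int.ofStr? (String.ofList [c1]) with
      | some n => some (String.ofList (Char.ofNat (c0.toNat - 1) ::
          (if is_in_even_col hex ≠ 0 then [c1] else PySem.Int.toChars (n - 1))))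
      | none => none
    | _, _ => none
  else if dir = "SW" then
    match PySem.Str.pyGet? hex 0, PySem.Str.pyGet? hex 1 with
    | some c0, some c1 =>
      if c0 = 'A' ∨ (is_in_even_col hex ≠ 0 ∧ c1 = '9') then none else
      match PySem.Int.ofStr? (String.ofList [c1]) with
      | some n => some (String.ofList (Char.ofNat (c0.toNat - 1) ::
          (if is_in_even_col hex = 0 then [c1] else PySem.Int.toChars (n + 1))))
      | none => none
    | _, _ => none
  else none     -- Python's match falls through: None

-- the while loop; fuel only makes it total (inside Pre_ the loop returns long before
-- exhaustion); on an emptied queue Python returns the string "IDK" — excluded by Pre_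
def bfsA (enemy : String) : Nat → List (String × List String) → PySem.Set String → List String
  | 0, _, _ => []
  | _ + 1, [], _ => []
  | fuel + 1, (hex, steps) :: queue, visited =>
    if hex = enemy then steps
    else
      let st := ["N", "NE", "SE", "S", "SW", "NW"].foldl
        (fun (st : List (String × List String) × PySem.Set String) dir =>
          match get_next_hex hex dir with
          | some nh =>
            if nh ∈ st.2 then st
            else (st.1 ++ [(nh, steps ++ [dir])], PySem.Set.add st.2 nh)
          | none => st) (queue, visited)
      bfsA enemy fuel st.1 st.2

def get_steps_to_enemy_bfs (you : String) (enemy : String) : List String :=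
  bfsA enemy 1000000 [(you, [])] (PySem.Set.ofList [you])

-- ===== PORT B =====

-- B's coordinate-arithmetic neighbour; `none` fallbacks = Python Index/ValueError, unreachable under Pre_
def nbr (cell : String) (d : String) : Option String :=
  match PySem.Str.pyGet? cell 0, PySem.Str.pyGet? cell 1 with
  | some ch, some rch =>
    match PySem.Int.ofStr? (String.ofList [rch]) with
    | some r =>
      let c : Int := (ch.toNat : Int) - 65
      let dc : Int := (if d = "NE" ∨ d = "SE" then 1 else 0) -
                      (if d = "NW" ∨ d = "SW" then 1 else 0)
      let dr : Int :=
        if d = "N" then -1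
        else if d = "S" then 1
        else if d = "NE" ∨ d = "NW" then (if PySem.Int.mod c 2 ≠ 0 then 0 else -1)
        else (if PySem.Int.mod c 2 ≠ 0 then 1 else 0)
      let c2 := c + dc
      let r2 := r + dr
      if 0 ≤ c2 ∧ c2 < 26 ∧ 1 ≤ r2 ∧ r2 ≤ 9 then
        some (String.ofList (Char.ofNat (65 + c2).toNat :: PySem.Int.toChars r2))
      else none
    | none => none
  | _, _ => none

-- walk came_from back to the start, collecting directions, then reverse; fuel
-- (one more than the dict can chain) only makes it total; the `none` fallback is
-- Python's KeyError — unreachable under Pre_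
def rebuild (cf : PySem.Dict String (String × String)) (you : String) :
    Nat → String → List String → List String
  | 0, _, steps => steps.reverse
  | f + 1, cell, steps =>
    if cell = you then steps.reverse
    else
      match cf.get? cell with
      | some (p, d) => rebuild cf you f p (steps ++ [d])
      | none => steps.reverse

-- B's while loop: queue of bare cells plus a came_from dict; "IDK" case as in bfsA
def bfsB (you : String) (enemy : String) :
    Nat → List String → PySem.Dict String (String × String) → PySem.Set String → List String
  | 0, _, _, _ => []
  | _ + 1, [], _, _ => []
  | fuel + 1, cell :: queue, cf, visited =>
    if cell = enemy then rebuild cf you (cf.items.length + 1) cell []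
    else
      let st := ["N", "NE", "SE", "S", "SW", "NW"].foldl
        (fun (st : List String × PySem.Dict String (String × String) × PySem.Set String) d =>
          match nbr cell d with
          | some nx =>
            if nx ∈ st.2.2 then st
            else (st.1 ++ [nx], st.2.1.insert nx (cell, d), PySem.Set.add st.2.2 nx)
          | none => st) (queue, cf, visited)
      bfsB you enemy fuel st.1 st.2.1 st.2.2

def get_steps_to_enemy_bfs_alt (you : String) (enemy : String) : List String :=
  if you = enemy then []
  else bfsB you enemy 1000000 [you] PySem.Dict.empty (PySem.Set.ofList [you])

-- ===== PRECONDITION & SPEC =====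

def validCell (s : String) : Bool :=
  match s.toList with
  | [c, r] => decide (65 ≤ c.toNat ∧ c.toNat ≤ 90 ∧ 49 ≤ r.toNat ∧ r.toNat ≤ 57)
  | _ => false

-- Pre_ restricts to the game's natural domain: both arguments are board cells "A1".."Z9"
-- (or you = enemy, where both return [] at once).  Outside it A raises ValueError /
-- IndexError, or returns the string "IDK" (not a list of steps), or — wandering off the
-- board through accidental pseudo-cells like "A-1" — returns a list that is an artefact
-- of its string arithmetic; see the cites in claim.json.
def Pre_get_steps_to_enemy_bfs (you : String) (enemy : String) : Prop :=
  you = enemy ∨ (validCell you = true ∧ validCell enemy = true)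
instance (you : String) (enemy : String) : Decidable (Pre_get_steps_to_enemy_bfs you enemy) := by
  unfold Pre_get_steps_to_enemy_bfs; infer_instance

def pvWitness_get_steps_to_enemy_bfs : String × String := ("A1", "C4")

def Spec_get_steps_to_enemy_bfs (you : String) (enemy : String) (out : List String) : Prop :=
  out = get_steps_to_enemy_bfs_alt you enemy
instance (you : String) (enemy : String) (out : List String) :
    Decidable (Spec_get_steps_to_enemy_bfs you enemy out) := by
  unfold Spec_get_steps_to_enemy_bfs; infer_instance

-- ===== CLAIM (what is proved, stated in full; the proofs are below) =====
def Claim_equal_get_steps_to_enemy_bfs : Prop :=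
  ∀ (you : String) (enemy : String), Dom_get_steps_to_enemy_bfs you enemy →
    Pre_get_steps_to_enemy_bfs you enemy →
    Spec_get_steps_to_enemy_bfs you enemy (get_steps_to_enemy_bfs you enemy)

-- ===== LEMMAS AND PROOFS =====

def pvDirs : List String := ["N", "NE", "SE", "S", "SW", "NW"]

def cellStr (i j : Nat) : String := String.ofList [Char.ofNat (65 + i), Char.ofNat (49 + j)]

lemma validCell_iff (s : String) :
    validCell s = true ↔ ∃ i : Fin 26, ∃ j : Fin 9, s = cellStr i j := by
  constructor
  · intro hv
    unfold validCell at hv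
    rcases hls : s.toList with _ | ⟨c, _ | ⟨r, _ | _⟩⟩ <;> rw [hls] at hv <;> simp_all
    refine ⟨⟨c.toNat - 65, by omega⟩, ⟨r.toNat - 49, by omega⟩, ?_⟩
    have hc : Char.ofNat (65 + (c.toNat - 65)) = c := by
      rw [show 65 + (c.toNat - 65) = c.toNat by omega]; exact Char.ofNat_toNat c
    have hr : Char.ofNat (49 + (r.toNat - 49)) = r := by
      rw [show 49 + (r.toNat - 49) = r.toNat by omega]; exact Char.ofNat_toNat r
    rw [← @String.ofList_toList s, hls]
    simp [cellStr, hc, hr]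
  · rintro ⟨i, j, rfl⟩
    revert i j; decide

lemma nbr_eq_gnh : ∀ (i : Fin 26) (j : Fin 9), ∀ d ∈ pvDirs,
    get_next_hex (cellStr i j) d = nbr (cellStr i j) d := by decide

lemma nbr_valid : ∀ (i : Fin 26) (j : Fin 9), ∀ d ∈ pvDirs,
    (nbr (cellStr i j) d).all validCell = true := by decide

-- "p is the direction path recorded in cf for cell h", with every cell on the walk in V
inductive SpineIn (cf : PySem.Dict String (String × String)) (you : String) (V : List String) :
    String → List String → Prop
  | base : you ∈ V → SpineIn cf you V you []
  | step {h par : String} {d : String} {p : List String} :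
      h ≠ you → h ∈ V → cf.get? h = some (par, d) → SpineIn cf you V par p →
      SpineIn cf you V h (p ++ [d])

lemma spine_mono {cf you V V' h p} (hVV : ∀ x ∈ V, x ∈ V') :
    SpineIn cf you V h p → SpineIn cf you V' h p := by
  intro hs
  induction hs with
  | base hy => exact .base (hVV _ hy)
  | step hne hm hg _ ih => exact .step hne (hVV _ hm) hg ih

lemma spine_insert {cf you V h p} {n : String} {x : String × String} (hn : n ∉ V) :
    SpineIn cf you V h p → SpineIn (cf.insert n x) you V h p := by
  intro hs
  induction hs with
  | base hy => exact .base hy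
  | step hne hm hg _ ih =>
    exact .step hne hm (by
      rw [PySem.Dict.get?_insert_of_ne _ _ (by rintro rfl; exact hn hm)]; exact hg) ih

lemma rebuild_spine {cf you V h p} (hs : SpineIn cf you V h p) :
    ∀ (f : Nat) (acc : List String), p.length < f → rebuild cf you f h acc = p ++ acc.reverse := by
  induction hs with
  | base _ =>
    intro f acc hf
    cases f with
    | zero => omega
    | succ f => simp [rebuild]
  | step hne _ hg _ ih =>
    intro f acc hf
    cases f with
    | zero => simp at hf
    | succ f =>
      simp only [rebuild, if_neg hne, hg]
      rw [ih f (acc ++ [_]) (by simpa using Nat.lt_of_succ_lt_succ (by simpa using hf))]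
      simp

-- the lockstep invariant
def LoopInv (you : String) (q : List (String × List String))
    (cf : PySem.Dict String (String × String)) (V : List String) : Prop :=
  you ∈ V ∧ (∀ k ∈ cf.keys, k ∈ V) ∧
  ∀ hp ∈ q, validCell hp.1 = true ∧ SpineIn cf you V hp.1 hp.2 ∧ hp.2.length ≤ cf.items.length

lemma fold_lockstep (you h : String) (p : List String) :
    ∀ (ds : List String) (q : List (String × List String))
      (cf : PySem.Dict String (String × String)) (V : PySem.Set String),
      LoopInv you q cf V →
      (∀ d ∈ ds, get_next_hex h d = nbr h d ∧ (nbr h d).all validCell = true) →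
      SpineIn cf you V h p → p.length ≤ cf.items.length →
      ∃ cf',
        ds.foldl (fun (st : List String × PySem.Dict String (String × String) × PySem.Set String) d =>
          match nbr h d with
          | some nx =>
            if nx ∈ st.2.2 then st
            else (st.1 ++ [nx], st.2.1.insert nx (h, d), PySem.Set.add st.2.2 nx)
          | none => st) (q.map Prod.fst, cf, V)
        = ((ds.foldl (fun (st : List (String × List String) × PySem.Set String) dir =>
            match get_next_hex h dir with
            | some nh =>
              if nh ∈ st.2 then st
              else (st.1 ++ [(nh, p ++ [dir])], PySem.Set.add st.2 nh)
            | none => st) (q, V)).1.map Prod.fst,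
           cf',
           (ds.foldl (fun (st : List (String × List String) × PySem.Set String) dir =>
            match get_next_hex h dir with
            | some nh =>
              if nh ∈ st.2 then st
              else (st.1 ++ [(nh, p ++ [dir])], PySem.Set.add st.2 nh)
            | none => st) (q, V)).2) ∧
        LoopInv you (ds.foldl (fun (st : List (String × List String) × PySem.Set String) dir =>
            match get_next_hex h dir with
            | some nh =>
              if nh ∈ st.2 then st
              else (st.1 ++ [(nh, p ++ [dir])], PySem.Set.add st.2 nh)
            | none => st) (q, V)).1 cf'
          (ds.foldl (fun (st : List (String × List String) × PySem.Set String) dir =>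
            match get_next_hex h dir with
            | some nh =>
              if nh ∈ st.2 then st
              else (st.1 ++ [(nh, p ++ [dir])], PySem.Set.add st.2 nh)
            | none => st) (q, V)).2 := by
  intro ds
  induction ds with
  | nil => intro q cf V hinv _ _ _; exact ⟨cf, rfl, hinv⟩
  | cons d ds ih =>
    intro q cf V hinv hd hsp hlen
    obtain ⟨hgn, hvald⟩ := hd d (List.mem_cons_self ..)
    have hd' : ∀ d' ∈ ds, get_next_hex h d' = nbr h d' ∧ (nbr h d').all validCell = true :=
      fun d' hmm => hd d' (List.mem_cons_of_mem _ hmm)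
    simp only [List.foldl_cons, hgn]
    cases hn : nbr h d with
    | none => exact ih q cf V hinv hd' hsp hlen
    | some nh =>
      by_cases hmem : nh ∈ V
      · simp only [if_pos hmem]
        exact ih q cf V hinv hd' hsp hlen
      · simp only [if_neg hmem]
        have hnkey : cf.contains nh = false := by
          cases hcc : cf.contains nh
          · rfl
          · exact absurd (hinv.2.1 nh ((PySem.Dict.contains_iff_mem_keys cf nh).mp hcc)) hmem
        have hitems : (cf.insert nh (h, d)).items = cf.items ++ [(nh, (h, d))] :=
          PySem.Dict.items_insert_of_not_contains cf (h, d) hnkey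
        have hadd : PySem.Set.add V nh = V ++ [nh] := PySem.Set.add_of_not_mem hmem
        have hmap : (q ++ [(nh, p ++ [d])]).map Prod.fst = q.map Prod.fst ++ [nh] := by simp
        have hsub : ∀ x ∈ V, x ∈ V ++ [nh] := fun x hx => List.mem_append_left _ hx
        have hyou : you ∈ V := hinv.1
        have hinv' : LoopInv you (q ++ [(nh, p ++ [d])]) (cf.insert nh (h, d)) (V ++ [nh]) := by
          refine ⟨hsub _ hyou, ?_, ?_⟩
          · intro k hk
            rcases (PySem.Dict.mem_keys_insert cf nh k (h, d)).mp hk with rfl | hk'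
            · simp
            · exact hsub _ (hinv.2.1 _ hk')
          · intro hp hhp
            obtain ⟨a, b⟩ := hp
            rcases List.mem_append.mp hhp with hq | hnew
            · obtain ⟨hv, hs, hl⟩ := hinv.2.2 (a, b) hq
              have hl' : b.length ≤ cf.items.length := hl
              exact ⟨hv, spine_mono hsub (spine_insert hmem hs), by simp [hitems]; omega⟩
            · simp only [List.mem_singleton, Prod.mk.injEq] at hnew
              obtain ⟨rfl, rfl⟩ := hnew
              refine ⟨?_, ?_, ?_⟩
              · simpa [hn] using hvald
              · exact SpineIn.step (fun (hne : a = you) => hmem (hne ▸ hyou)) (by simp)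
                  (PySem.Dict.get?_insert_self ..)
                  (spine_mono hsub (spine_insert hmem hsp))
              · simp [hitems]; omega
        have hsp' : SpineIn (cf.insert nh (h, d)) you (V ++ [nh]) h p :=
          spine_mono hsub (spine_insert hmem hsp)
        have hlen' : p.length ≤ (cf.insert nh (h, d)).items.length := by
          simp [hitems]; omega
        have := ih (q ++ [(nh, p ++ [d])]) (cf.insert nh (h, d)) (V ++ [nh]) hinv' hd' hsp' hlen'
        rw [hadd, ← hmap]
        exact this

lemma bfs_lockstep (you enemy : String) :
    ∀ (fuel : Nat) (q : List (String × List String))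
      (cf : PySem.Dict String (String × String)) (V : PySem.Set String),
      LoopInv you q cf V →
      bfsA enemy fuel q V = bfsB you enemy fuel (q.map Prod.fst) cf V := by
  intro fuel
  induction fuel with
  | zero => intro q cf V _; simp [bfsA, bfsB]
  | succ fuel ih =>
    intro q cf V hinv
    cases q with
    | nil => simp [bfsA, bfsB]
    | cons hp rest =>
      obtain ⟨h, p⟩ := hp
      obtain ⟨hv, hs, hl⟩ := hinv.2.2 (h, p) (List.mem_cons_self ..)
      simp only [List.map_cons, bfsA, bfsB]
      by_cases he : h = enemy
      · rw [if_pos he, if_pos he]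
        refine Eq.symm ?_
        simpa using rebuild_spine hs (cf.items.length + 1) [] (by omega)
      · rw [if_neg he, if_neg he]
        obtain ⟨i, j, rfl⟩ := (validCell_iff h).mp hv
        have hrest : LoopInv you rest cf V :=
          ⟨hinv.1, hinv.2.1, fun x hx => hinv.2.2 x (List.mem_cons_of_mem _ hx)⟩
        have hd : ∀ d ∈ (["N", "NE", "SE", "S", "SW", "NW"] : List String),
            get_next_hex (cellStr i j) d = nbr (cellStr i j) d ∧
            (nbr (cellStr i j) d).all validCell = true :=
          fun d hdm => ⟨nbr_eq_gnh i j d hdm, nbr_valid i j d hdm⟩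
        obtain ⟨cf', heq, hinv'⟩ := fold_lockstep you (cellStr i j) p
          ["N", "NE", "SE", "S", "SW", "NW"] rest cf V hrest hd hs hl
        rw [heq]
        exact ih _ cf' _ hinv' 

-- ===== VERDICT (by name: the statement is the Claim_ definition above) =====
theorem get_steps_to_enemy_bfs_spec : Claim_equal_get_steps_to_enemy_bfs := by
  intro you enemy _ hpre
  unfold Spec_get_steps_to_enemy_bfs get_steps_to_enemy_bfs get_steps_to_enemy_bfs_alt
  by_cases he : you = enemy
  · subst he
    rw [if_pos rfl]
    rw [show (1000000 : Nat) = 999999 + 1 from rfl]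
    simp [bfsA]
  · rcases hpre with rfl | ⟨hvy, _⟩
    · exact absurd rfl he
    rw [if_neg he]
    have h0 := bfs_lockstep you enemy 1000000 [(you, [])] PySem.Dict.empty
      (PySem.Set.ofList [you]) ?_
    · simpa using h0
    · refine ⟨?_, ?_, ?_⟩
      · exact (PySem.Set.mem_ofList [you] you).mpr (List.mem_singleton.mpr rfl)
      · intro k hk; simp [PySem.Dict.keys_empty] at hk
      · intro hp hhp
        simp at hhp
        subst hhp
        exact ⟨hvy, SpineIn.base ((PySem.Set.mem_ofList [you] you).mpr (List.mem_singleton.mpr rfl)),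
          by simp [PySem.Dict.empty]⟩
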